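-- pv_equiv track=rewrite | github.com/ldct/cp | yukicoder/259/C/C.py | prefix2
-- ===== SOURCE A (Python) =====
-- MODULUS = 1000000007
--
-- def prefix1(row):
--     ret = [1]
--     for a in row:
--         ret += [(ret[-1] * a) % MODULUS]
--     return ret
--
-- def prefix2(A):
--     prefixes = []
--     for row in A:
--         prefixes += [prefix1(row)]
--
--     # transpose
--     prefixes = list(zip(*prefixes))
--
--     prefixes2 = []
--     for row in prefixes:
--         prefixes2 += [prefix1(row)]
--
--     ret = list(zip(*prefixes2))
--
--     # optional: chop
--     ret = [row[1:] for row in ret][1:]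
--
--     return ret
-- ===== SOURCE B (Python) =====
-- MODULUS = 1000000007
--
-- def prefix2(A):
--     if not A:
--         return []
--     m = min(len(row) for row in A)
--     prev = [1] * m
--     out = []
--     for row in A:
--         acc = 1
--         cur = []
--         for j in range(m):
--             acc = (acc * row[j]) % MODULUS
--             cur.append((prev[j] * acc) % MODULUS)
--         out.append(tuple(cur))
--         prev = cur
--     return out
-- ===== Notes on version B (the rewrite author's own statement) =====
-- stated objective: faster
-- what changed: Replaces the build-all-row-prefixes / transpose / column-prefixes / transpose / chop pipeline by a single row-by-row pass with a rolling 1-D accumulator (running column products), building each output row directly.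
import Mathlib
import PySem

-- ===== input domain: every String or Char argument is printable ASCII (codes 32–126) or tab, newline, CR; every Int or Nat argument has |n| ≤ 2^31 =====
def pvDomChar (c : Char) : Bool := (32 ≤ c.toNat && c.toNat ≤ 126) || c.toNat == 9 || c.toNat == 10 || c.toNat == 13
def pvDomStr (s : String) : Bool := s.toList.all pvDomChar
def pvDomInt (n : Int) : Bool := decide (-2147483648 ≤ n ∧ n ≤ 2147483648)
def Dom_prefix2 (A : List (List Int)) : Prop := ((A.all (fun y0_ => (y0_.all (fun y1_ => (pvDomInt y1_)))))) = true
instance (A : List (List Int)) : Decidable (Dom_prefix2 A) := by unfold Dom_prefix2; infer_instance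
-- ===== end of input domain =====

-- B replaces A's prefix/transpose/prefix/transpose/chop pipeline by one row-by-row pass
-- with a rolling 1-D accumulator of running column products (return value equivalence).

-- ===== PORT A =====
def MODULUS : Int := 1000000007

-- ret = [1]; for a in row: ret += [(ret[-1] * a) % MODULUS]
def prefix1 (row : List Int) : List Int :=
  row.foldl (fun ret a => ret ++ [PySem.Int.mod ((ret.getLast?.getD 0) * a) MODULUS]) [1]

-- models Python's zip(*xss): take one element of every row while all rows are nonempty (exact)
def zipStar (xss : List (List Int)) : List (List Int) :=
  if xss.isEmpty || xss.any (·.isEmpty) then []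
  else (xss.map (fun r => r.headI)) :: zipStar (xss.map (fun r => r.tail))
termination_by xss.headI.length
decreasing_by
  rename_i h
  simp only [Bool.or_eq_true, List.isEmpty_iff, List.any_eq_true, List.isEmpty_iff, not_or,
    not_exists, not_and] at h
  obtain ⟨h1, h2⟩ := h
  cases xss with
  | nil => exact absurd rfl h1
  | cons x xs =>
    have hx : x ≠ [] := h2 x (by simp)
    simp only [List.headI_cons]
    cases x with
    | nil => exact absurd rfl hx
    | cons a as => simp

def prefix2 (A : List (List Int)) : List (List Int) :=
  let prefixes := A.foldl (fun ps row => ps ++ [prefix1 row]) []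
  let prefixesT := zipStar prefixes
  let prefixes2 := prefixesT.foldl (fun ps row => ps ++ [prefix1 row]) []
  let ret := zipStar prefixes2
  (ret.map (fun row => row.drop 1)).drop 1

-- ===== PORT B =====
-- inner loop: for j in range(m): acc = (acc*row[j]) % MODULUS; cur.append((prev[j]*acc) % MODULUS)
def altRow (prev row : List Int) (m : Nat) : List Int :=
  ((List.range m).foldl
    (fun (st : Int × List Int) j =>
      let acc := PySem.Int.mod (st.1 * (row.getD j 0)) MODULUS
      (acc, st.2 ++ [PySem.Int.mod ((prev.getD j 0) * acc) MODULUS]))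
    (1, [])).2

def prefix2_alt (A : List (List Int)) : List (List Int) :=
  if A.isEmpty then []
  else
    let m := ((A.map List.length).min?).getD 0
    ((A.foldl
      (fun (st : List Int × List (List Int)) row =>
        let cur := altRow st.1 row m
        (cur, st.2 ++ [cur]))
      (List.replicate m 1, []))).2

-- ===== PRECONDITION & SPEC =====
def Spec_prefix2 (A : List (List Int)) (out : List (List Int)) : Prop := out = prefix2_alt A
instance (A : List (List Int)) (out : List (List Int)) : Decidable (Spec_prefix2 A out) := by unfold Spec_prefix2; infer_instance

-- ===== CLAIM (what is proved, stated in full; the proofs are below) =====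
def Claim_equal_prefix2 : Prop := ∀ (A : List (List Int)), Dom_prefix2 A → Spec_prefix2 A (prefix2 A)

-- ===== LEMMAS AND PROOFS =====

theorem MODULUS_pos : 0 < MODULUS := by unfold MODULUS; norm_num

theorem pymod_eq (x : Int) : PySem.Int.mod x MODULUS = x % MODULUS :=
  PySem.Int.mod_eq_emod_of_pos MODULUS_pos

-- the common closed form both programs compute
def prefn (u : List Int) : List Int :=
  (List.range (u.length + 1)).map (fun j => ((u.take j).prod) % MODULUS)

def minD (l : List Nat) : Nat := l.min?.getD 0

def qv (A : List (List Int)) (i j : Nat) : Int :=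
  (((A.take i).map (fun r => (r.take j).prod)).prod) % MODULUS

def specOut (A : List (List Int)) : List (List Int) :=
  (List.range A.length).map (fun i =>
    (List.range (minD (A.map List.length))).map (fun j => qv A (i + 1) (j + 1)))

-- generic list helpers
theorem foldl_app {α β : Type} (f : α → β) (xs : List α) (acc : List β) :
    xs.foldl (fun ps r => ps ++ [f r]) acc = acc ++ xs.map f := by
  induction xs generalizing acc with
  | nil => simp
  | cons x xs ih => simp [ih]

theorem getD_range_map {β : Type} (f : Nat → β) (d : β) {j n : Nat} (h : j < n) :
    (((List.range n).map f).getD j d) = f j := by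
  simp [List.getD, h]

theorem drop1_range_map {β : Type} (f : Nat → β) (n : Nat) :
    (((List.range (n + 1)).map f).drop 1) = (List.range n).map (fun i => f (i + 1)) := by
  rw [List.range_succ_eq_map]
  simp [Function.comp, Nat.succ_eq_add_one]

theorem mul_emod_left' (x a : Int) : (x % MODULUS * a) % MODULUS = (x * a) % MODULUS := by
  conv_lhs => rw [Int.mul_emod, Int.emod_emod_of_dvd _ dvd_rfl, ← Int.mul_emod]

theorem mul_emod_right' (x a : Int) : (a * (x % MODULUS)) % MODULUS = (a * x) % MODULUS := by
  rw [mul_comm, mul_emod_left', mul_comm]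

theorem prod_map_emod (l : List Int) : ((l.map (· % MODULUS)).prod) % MODULUS = l.prod % MODULUS := by
  induction l with
  | nil => rfl
  | cons x l ih =>
    simp only [List.map_cons, List.prod_cons]
    rw [mul_emod_left', Int.mul_emod, ih, ← Int.mul_emod]

-- minD facts
theorem minD_spec {l : List Nat} (h : l ≠ []) : minD l ∈ l ∧ ∀ b ∈ l, minD l ≤ b := by
  obtain ⟨v, hv⟩ : ∃ v, l.min? = some v := by
    cases l with
    | nil => exact absurd rfl h
    | cons a l => exact ⟨_, List.min?_cons'⟩
  have hs := List.min?_eq_some_iff.mp hv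
  simpa [minD, hv] using hs

theorem minD_zero {l : List Nat} (h : (0 : Nat) ∈ l) : minD l = 0 := by
  have hne : l ≠ [] := by rintro rfl; simp at h
  exact Nat.le_antisymm ((minD_spec hne).2 0 h) (Nat.zero_le _)

theorem minD_map {f : Nat → Nat} (hf : Monotone f) {l : List Nat} (h : l ≠ []) :
    minD (l.map f) = f (minD l) := by
  obtain ⟨hm, hle⟩ := minD_spec h
  have : (l.map f).min? = some (f (minD l)) := by
    rw [List.min?_eq_some_iff]
    constructor
    · exact List.mem_map_of_mem hm
    · rintro b hb
      obtain ⟨a, ha, rfl⟩ := List.mem_map.mp hb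
      exact hf (hle a ha)
  simp [minD, this]

-- prefix1 computes the closed form
theorem prefn_last (s : List Int) : (prefn s).getLast?.getD 0 = s.prod % MODULUS := by
  unfold prefn
  rw [List.range_succ, List.map_append]
  simp

theorem prefn_snoc (s : List Int) (a : Int) :
    prefn (s ++ [a]) = prefn s ++ [(s.prod * a) % MODULUS] := by
  unfold prefn
  simp only [List.length_append, List.length_cons, List.length_nil]
  rw [show s.length + (0+1) + 1 = (s.length + 1) + 1 by omega, List.range_succ, List.map_append]
  congr 1
  · apply List.map_congr_left
    intro j hj
    rw [List.take_append_of_le_length (by simpa using Nat.lt_succ_iff.mp (List.mem_range.mp hj))]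
  · simp

theorem prefix1_fold (r s : List Int) :
    r.foldl (fun ret a => ret ++ [PySem.Int.mod ((ret.getLast?.getD 0) * a) MODULUS]) (prefn s)
    = prefn (s ++ r) := by
  induction r generalizing s with
  | nil => simp
  | cons a r ih =>
    rw [List.foldl_cons, prefn_last, pymod_eq, mul_emod_left', ← prefn_snoc, ih]
    simp

theorem prefn_nil : prefn [] = [1] := by
  unfold prefn
  norm_num [List.range_succ, MODULUS]

theorem prefix1_eq_prefn (r : List Int) : prefix1 r = prefn r := by
  unfold prefix1
  rw [← prefn_nil, prefix1_fold]
  simp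

theorem prefn_getD (u : List Int) {j : Nat} (h : j ≤ u.length) :
    (prefn u).getD j 0 = ((u.take j).prod) % MODULUS := by
  unfold prefn
  exact getD_range_map _ _ (by omega)

-- zipStar characterization
theorem getD_tail (r : List Int) (j : Nat) : r.tail.getD j 0 = r.getD (j + 1) 0 := by
  cases r <;> simp [List.getD]

theorem zipStar_eq (xss : List (List Int)) :
    zipStar xss = (List.range (minD (xss.map List.length))).map
      (fun j => xss.map (fun r => r.getD j 0)) := by
  induction xss using zipStar.induct with
  | case1 xss h =>
    rw [zipStar, if_pos h]
    rcases Bool.or_eq_true_iff.mp h with h1 | h2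
    · have : xss = [] := List.isEmpty_iff.mp h1
      subst this; simp [minD]
    · obtain ⟨r, hr, hre⟩ := List.any_eq_true.mp h2
      have h0 : (0 : Nat) ∈ xss.map List.length := by
        exact List.mem_map.mpr ⟨r, hr, by simp [List.isEmpty_iff.mp hre]⟩
      rw [minD_zero h0]; simp
  | case2 xss h ih =>
    rw [zipStar, if_neg h]
    simp only [Bool.or_eq_true, List.isEmpty_iff, List.any_eq_true, not_or, not_exists,
      not_and] at h
    obtain ⟨h1, h2⟩ := h
    have hne : ∀ r ∈ xss, r ≠ [] := fun r hr => by
      intro hrnil; exact (h2 r hr) (by simp [hrnil])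
    have hattach : (List.map (fun x_1 : {r // r ∈ xss} =>
        match x_1 with | ⟨r, _⟩ => r.tail) xss.attach) = xss.map (fun r => r.tail) := by
      simp
    rw [hattach] at ih
    have hmapmap : (xss.map (fun r => r.tail)).map List.length
        = (xss.map List.length).map (fun k => k - 1) := by
      simp [Function.comp]
    have hlenne : xss.map List.length ≠ [] := by
      simp [h1]
    have hmin1 : 1 ≤ minD (xss.map List.length) := by
      obtain ⟨hm, _⟩ := minD_spec hlenne
      obtain ⟨r, hr, hrl⟩ := List.mem_map.mp hm
      have : r ≠ [] := hne r hr
      cases r with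
      | nil => exact absurd rfl this
      | cons a as => rw [← hrl]; simp
    have hmind : minD ((xss.map (fun r => r.tail)).map List.length)
        = minD (xss.map List.length) - 1 := by
      rw [hmapmap, minD_map (fun a b hab => Nat.sub_le_sub_right hab 1) hlenne]
    rw [ih, hmind]
    obtain ⟨k, hk⟩ : ∃ k, minD (xss.map List.length) = k + 1 :=
      ⟨minD (xss.map List.length) - 1, by omega⟩
    rw [hk]
    simp only [Nat.add_sub_cancel]
    rw [List.range_succ_eq_map, List.map_cons, List.map_map]
    congr 1
    · apply List.map_congr_left
      intro r _
      cases r <;> simp [List.getD]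
    · apply List.map_congr_left
      intro j _
      simp only [Function.comp, List.map_map]
      apply List.map_congr_left
      intro r _
      exact getD_tail r j

-- A-side: prefix2 computes specOut
theorem minD_replicate (k v : Nat) : minD (List.replicate (k + 1) v) = v := by
  have : (List.replicate (k + 1) v).min? = some v := by
    rw [List.min?_eq_some_iff]
    constructor
    · simp
    · intro b hb; simp [List.eq_of_mem_replicate hb]
  simp [minD, this]

theorem prefix2_eq_spec (A : List (List Int)) : prefix2 A = specOut A := by
  rcases eq_or_ne A [] with rfl | hA
  · have hz : zipStar [] = [] := by rw [zipStar]; rfl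
    simp [prefix2, hz, specOut]
  unfold prefix2
  simp only [foldl_app, List.nil_append]
  have hAlenne : A.map List.length ≠ [] := by simp [hA]
  have hmle : ∀ r ∈ A, minD (A.map List.length) ≤ r.length := fun r hr =>
    (minD_spec hAlenne).2 _ (List.mem_map_of_mem hr)
  set m := minD (A.map List.length) with hm
  set n := A.length with hn
  -- stage 1: rows of prefixes are prefn rows
  rw [show A.map prefix1 = A.map prefn from List.map_congr_left (fun r _ => prefix1_eq_prefn r)]
  -- stage 2: first transpose
  rw [zipStar_eq (A.map prefn)]
  have hlen1 : (A.map prefn).map List.length = (A.map List.length).map (fun k => k + 1) := by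
    simp [prefn, Function.comp]
  have hmin1 : minD ((A.map prefn).map List.length) = m + 1 := by
    rw [hlen1, minD_map (fun a b hab => by omega) hAlenne]
  rw [hmin1]
  have hcols : (List.range (m + 1)).map (fun j => (A.map prefn).map (fun r => r.getD j 0))
      = (List.range (m + 1)).map (fun j =>
          (A.map (fun r => (r.take j).prod)).map (fun x => x % MODULUS)) := by
    apply List.map_congr_left
    intro j hj
    have hjm : j ≤ m := Nat.lt_succ_iff.mp (List.mem_range.mp hj)
    simp only [List.map_map]
    apply List.map_congr_left
    intro r hr
    simp only [Function.comp]
    exact prefn_getD r (le_trans hjm (hmle r hr))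
  rw [hcols]
  -- stage 3: prefn of each column
  rw [show ((List.range (m + 1)).map (fun j =>
        (A.map (fun r => (r.take j).prod)).map (fun x => x % MODULUS))).map prefix1
      = (List.range (m + 1)).map (fun j => (List.range (n + 1)).map (fun i => qv A i j)) by
    rw [List.map_map]
    apply List.map_congr_left
    intro j _
    simp only [Function.comp, prefix1_eq_prefn]
    unfold prefn
    simp only [List.length_map, ← hn]
    apply List.map_congr_left
    intro i hi
    rw [← List.map_take, ← List.map_take, prod_map_emod, List.map_take]
    simp [qv, List.map_take]]
  -- stage 4: second transpose
  rw [zipStar_eq ((List.range (m + 1)).map (fun j => (List.range (n + 1)).map (fun i => qv A i j)))]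
  have hlen2 : ((List.range (m + 1)).map (fun j => (List.range (n + 1)).map
      (fun i => qv A i j))).map List.length = List.replicate (m + 1) (n + 1) := by
    rw [List.map_map]
    simp [Function.comp, List.eq_replicate_iff]
  rw [hlen2, minD_replicate]
  -- stage 5: read off entries and chop
  have hrows : (List.range (n + 1)).map (fun i =>
        ((List.range (m + 1)).map (fun j => (List.range (n + 1)).map
          (fun i' => qv A i' j))).map (fun r => r.getD i 0))
      = (List.range (n + 1)).map (fun i => (List.range (m + 1)).map (fun j => qv A i j)) := by
    apply List.map_congr_left
    intro i hi
    rw [List.map_map]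
    apply List.map_congr_left
    intro j _
    simp only [Function.comp]
    exact getD_range_map _ _ (List.mem_range.mp hi)
  rw [hrows, List.map_map]
  have hinner : ∀ i : Nat, ((List.range (m + 1)).map (fun j => qv A i j)).drop 1
      = (List.range m).map (fun j => qv A i (j + 1)) := fun i => drop1_range_map _ _
  rw [show ((List.range (n + 1)).map ((fun row => List.drop 1 row) ∘
        fun i => (List.range (m + 1)).map (fun j => qv A i j)))
      = (List.range (n + 1)).map (fun i => (List.range m).map (fun j => qv A i (j + 1))) from
    List.map_congr_left (fun i _ => hinner i)]
  rw [drop1_range_map]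
  rfl

-- B-side inner loop
theorem altRow_state (prev row : List Int) (m : Nat) (h : m ≤ row.length) :
    ((List.range m).foldl
      (fun (st : Int × List Int) j =>
        let acc := PySem.Int.mod (st.1 * (row.getD j 0)) MODULUS
        (acc, st.2 ++ [PySem.Int.mod ((prev.getD j 0) * acc) MODULUS]))
      (1, []))
    = (((row.take m).prod) % MODULUS,
       (List.range m).map (fun j => (prev.getD j 0 * (row.take (j + 1)).prod) % MODULUS)) := by
  induction m with
  | zero =>
    simp only [List.range_zero, List.foldl_nil, List.take_zero, List.prod_nil, List.map_nil]
    decide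
  | succ k ih =>
    have hk : k < row.length := h
    rw [List.range_succ, List.foldl_append, ih (Nat.le_of_succ_le h)]
    simp only [List.foldl_cons, List.foldl_nil, pymod_eq]
    have htake : row.take (k + 1) = row.take k ++ [row.getD k 0] := by
      rw [List.take_add_one, List.getElem?_eq_getElem hk]
      simp [List.getD, List.getElem?_eq_getElem hk]
    have h1 : ((row.take k).prod % MODULUS * row.getD k 0) % MODULUS
        = (row.take (k + 1)).prod % MODULUS := by
      rw [mul_emod_left', htake]; simp
    rw [List.map_append, h1, mul_emod_right']
    simp

-- B-side outer loop
theorem run_spec (m : Nat) (rows : List (List Int)) (c : Nat → Int) (out : List (List Int))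
    (h : ∀ r ∈ rows, m ≤ r.length) :
    (rows.foldl
      (fun (st : List Int × List (List Int)) row =>
        let cur := altRow st.1 row m
        (cur, st.2 ++ [cur]))
      ((List.range m).map (fun j => c j % MODULUS), out)).2
    = out ++ (List.range rows.length).map (fun i =>
        (List.range m).map (fun j =>
          (c j * ((rows.take (i + 1)).map (fun r => (r.take (j + 1)).prod)).prod) % MODULUS)) := by
  induction rows generalizing c out with
  | nil => simp
  | cons r rs ih =>
    simp only [List.foldl_cons]
    have hmr : m ≤ r.length := h r (by simp)
    have hcur : altRow ((List.range m).map (fun j => c j % MODULUS)) r m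
        = (List.range m).map (fun j => (c j * (r.take (j + 1)).prod) % MODULUS) := by
      unfold altRow
      rw [altRow_state _ _ _ hmr]
      apply List.map_congr_left
      intro j hj
      rw [getD_range_map _ _ (List.mem_range.mp hj), mul_emod_left']
    rw [hcur]
    have ih' := ih (fun j => c j * (r.take (j + 1)).prod) (out ++
      [(List.range m).map (fun j => (c j * (r.take (j + 1)).prod) % MODULUS)])
      (fun r' hr' => h r' (by simp [hr']))
    rw [ih']
    rw [List.length_cons, List.range_succ_eq_map, List.map_cons, List.map_map]
    rw [List.append_assoc, List.singleton_append]
    congr 1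
    congr 1
    · apply List.map_congr_left
      intro j _
      simp
    · apply List.map_congr_left
      intro i _
      apply List.map_congr_left
      intro j _
      simp only [List.take_succ_cons, List.map_cons, List.prod_cons]
      rw [← mul_assoc]

theorem alt_eq_spec (A : List (List Int)) : prefix2_alt A = specOut A := by
  rcases eq_or_ne A [] with rfl | hA
  · simp [prefix2_alt, specOut]
  unfold prefix2_alt
  rw [if_neg (by simp [hA])]
  have hAlenne : A.map List.length ≠ [] := by simp [hA]
  have hmle : ∀ r ∈ A, ((A.map List.length).min?.getD 0) ≤ r.length := fun r hr =>
    (minD_spec hAlenne).2 _ (List.mem_map_of_mem hr)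
  have hrep : List.replicate ((A.map List.length).min?.getD 0) (1 : Int)
      = (List.range ((A.map List.length).min?.getD 0)).map
          (fun j => ((fun _ : Nat => (1 : Int)) j) % MODULUS) := by
    have h1 : ((1 : Int) % MODULUS) = 1 := by decide
    simp only [h1]
    symm
    refine List.eq_replicate_iff.mpr ⟨by simp, ?_⟩
    intro b hb
    obtain ⟨a, -, hab⟩ := List.mem_map.mp hb
    exact hab.symm
  show (List.foldl
      (fun (st : List Int × List (List Int)) row =>
        let cur := altRow st.1 row ((A.map List.length).min?.getD 0)
        (cur, st.2 ++ [cur]))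
      (List.replicate ((A.map List.length).min?.getD 0) 1, []) A).2 = specOut A
  rw [hrep, run_spec ((A.map List.length).min?.getD 0) A (fun _ => (1 : Int)) [] hmle]
  simp only [one_mul, List.nil_append]
  rfl

-- ===== VERDICT (by name: the statement is the Claim_ definition above) =====
theorem prefix2_spec : Claim_equal_prefix2 := by
  intro A _
  unfold Spec_prefix2
  rw [prefix2_eq_spec, alt_eq_spec]
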